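-- pv_equiv track=rewrite | github.com/c0derMo/advent-of-code | 2016/07/task.py | supports_ssl
-- ===== SOURCE A (Python) =====
-- def supports_ssl(checking: str) -> bool:
--     inside_brackets = False
--     abas = []
--     babs = []
--     for i in range(len(checking) - 2):
--         if checking[i] == "[":
--             inside_brackets = True
--         elif checking[i] == "]":
--             inside_brackets = False
--         elif checking[i] == checking[i+2] and checking[i] != checking[i+1]:
--             if inside_brackets:
--                 babs.append(checking[i:i+3])
--                 corresponding_aba = checking[i+1] + checking[i] + checking[i+1]
--                 if corresponding_aba in abas:
--                     return True
--             else: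
--                 abas.append(checking[i:i+3])
--                 corresponding_bab = checking[i+1] + checking[i] + checking[i+1]
--                 if corresponding_bab in babs:
--                     return True
--     return False
-- ===== SOURCE B (Python) =====
-- def supports_ssl(checking: str) -> bool:
--     # Phase 1: partition into (inside_brackets, segment) pieces with A's bracket toggle.
--     segments = []
--     current = ""
--     inside = False
--     for ch in checking:
--         if ch == "[" or ch == "]":
--             segments.append((inside, current))
--             current = ""
--             inside = ch == "["
--         else:
--             current += ch
--     segments.append((inside, current))
--     # Phase 2: collect all ABA pairs of the supernet and hypernet segments.
--     abas = set()
--     babs = set()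
--     for inside, seg in segments:
--         for k in range(len(seg) - 2):
--             if seg[k] == seg[k + 2] and seg[k] != seg[k + 1]:
--                 (babs if inside else abas).add((seg[k], seg[k + 1]))
--     # Phase 3: an ABA outside matches a BAB inside.
--     return any((b, a) in abas for (a, b) in babs)
-- ===== Notes on version B (the rewrite author's own statement) =====
-- stated objective: idiomatic
-- what changed: A's single incremental state-machine pass (append-and-scan lists with early return) is replaced by a three-phase structure: partition the string into supernet/hypernet segments with the same bracket toggle, collect all ABA pairs of each side into two sets in one sweep, then test whether some hypernet BAB has its matching supernet ABA in the set.
import Mathlib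
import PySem

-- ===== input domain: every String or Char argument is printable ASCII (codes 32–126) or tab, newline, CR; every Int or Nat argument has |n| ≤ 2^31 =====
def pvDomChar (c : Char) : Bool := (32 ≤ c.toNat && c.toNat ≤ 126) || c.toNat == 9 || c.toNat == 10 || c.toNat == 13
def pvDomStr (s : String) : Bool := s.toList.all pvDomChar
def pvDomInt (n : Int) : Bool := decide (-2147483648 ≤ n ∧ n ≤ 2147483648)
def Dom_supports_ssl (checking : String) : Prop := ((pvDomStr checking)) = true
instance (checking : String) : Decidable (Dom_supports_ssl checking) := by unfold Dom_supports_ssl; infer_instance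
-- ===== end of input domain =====

-- B replaces A's incremental state machine (with early return and list-membership scans) by a
-- parse-into-segments / collect-ABA-sets / intersect structure; objective: idiomatic, not faster.

-- ===== PORT A =====
def aLoop (s : List Char) (inside : Bool) (abas babs : List (List Char)) : List Int → Bool
  | [] => false
  | i :: rest =>
    if PySem.List.pyGetD s i ' ' = '[' then aLoop s true abas babs rest
    else if PySem.List.pyGetD s i ' ' = ']' then aLoop s false abas babs rest
    else if PySem.List.pyGetD s i ' ' = PySem.List.pyGetD s (i+2) ' ' ∧
            PySem.List.pyGetD s i ' ' ≠ PySem.List.pyGetD s (i+1) ' ' then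
      if inside then
        let babs' := babs ++ [PySem.List.slice s (some i) (some (i+3))]
        let corresponding_aba :=
          [PySem.List.pyGetD s (i+1) ' ', PySem.List.pyGetD s i ' ', PySem.List.pyGetD s (i+1) ' ']
        if abas.contains corresponding_aba then true else aLoop s inside abas babs' rest
      else
        let abas' := abas ++ [PySem.List.slice s (some i) (some (i+3))]
        let corresponding_bab :=
          [PySem.List.pyGetD s (i+1) ' ', PySem.List.pyGetD s i ' ', PySem.List.pyGetD s (i+1) ' ']
        if babs.contains corresponding_bab then true else aLoop s inside abas' babs rest
    else aLoop s inside abas babs rest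

def supports_ssl (checking : String) : Bool :=
  aLoop checking.toList false [] []
    (PySem.List.pyRange 0 ((checking.toList.length : Int) - 2) 1)

-- ===== PORT B =====
-- phase 1 step: bracket-toggle partition into (inside, segment) pieces
def bSegStep (st : List (Bool × List Char) × List Char × Bool) (ch : Char) :
    List (Bool × List Char) × List Char × Bool :=
  if ch = '[' ∨ ch = ']' then (st.1 ++ [(st.2.2, st.2.1)], [], ch = '[')
  else (st.1, st.2.1 ++ [ch], st.2.2)

-- phase 2 step: scan one segment for ABA triples, adding the pairs to the matching set
def bAddTriples (p : PySem.Set (Char × Char) × PySem.Set (Char × Char)) (seg : Bool × List Char) :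
    PySem.Set (Char × Char) × PySem.Set (Char × Char) :=
  (PySem.List.pyRange 0 ((seg.2.length : Int) - 2) 1).foldl
    (fun q k =>
      if PySem.List.pyGetD seg.2 k ' ' = PySem.List.pyGetD seg.2 (k+2) ' ' ∧
         PySem.List.pyGetD seg.2 k ' ' ≠ PySem.List.pyGetD seg.2 (k+1) ' ' then
        if seg.1 then (q.1, PySem.Set.add q.2 (PySem.List.pyGetD seg.2 k ' ', PySem.List.pyGetD seg.2 (k+1) ' '))
        else (PySem.Set.add q.1 (PySem.List.pyGetD seg.2 k ' ', PySem.List.pyGetD seg.2 (k+1) ' '), q.2)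
      else q) p

def supports_ssl_alt (checking : String) : Bool :=
  let st := checking.toList.foldl bSegStep ([], [], false)
  let segments := st.1 ++ [(st.2.2, st.2.1)]
  let sets := segments.foldl bAddTriples (PySem.Set.empty, PySem.Set.empty)
  sets.2.any (fun ab => PySem.Set.contains sets.1 (ab.2, ab.1))

-- ===== PRECONDITION & SPEC =====
def Spec_supports_ssl (checking : String) (out : Bool) : Prop := out = supports_ssl_alt checking
instance (checking : String) (out : Bool) : Decidable (Spec_supports_ssl checking out) := by unfold Spec_supports_ssl; infer_instance

-- ===== CLAIM (what is proved, stated in full; the proofs are below) =====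
def Claim_equal_supports_ssl : Prop := ∀ (checking : String), Dom_supports_ssl checking → Spec_supports_ssl checking (supports_ssl checking)

-- ===== LEMMAS AND PROOFS =====

-- bracket-state machine shared by the two characterisations
def stA (st : Bool) (c : Char) : Bool := if c = '[' then true else if c = ']' then false else st
def stFrom (st : Bool) (l : List Char) : Bool := l.foldl stA st
def stateAt (s : List Char) (i : Nat) : Bool := stFrom false (s.take i)

def brFree (l : List Char) : Prop := ∀ c ∈ l, c ≠ '[' ∧ c ≠ ']'

-- an ABA triple (first character not a bracket) at absolute position i
def TriAt (s : List Char) (i : Nat) (a b : Char) : Prop :=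
  i + 2 < s.length ∧ s.getD i ' ' = a ∧ s.getD (i+1) ' ' = b ∧ s.getD (i+2) ' ' = a ∧
    a ≠ b ∧ a ≠ '[' ∧ a ≠ ']'

-- common characterisation of both programs
def SpecT (s : List Char) : Prop :=
  ∃ a b i j, TriAt s i a b ∧ stateAt s i = false ∧ TriAt s j b a ∧ stateAt s j = true

-- list/indexing helpers
theorem getD_app_left (l1 l2 : List Char) (i : Nat) (d : Char) (h : i < l1.length) :
    (l1 ++ l2).getD i d = l1.getD i d := List.getD_append _ _ _ _ h

theorem getD_app_right (l1 l2 : List Char) (k : Nat) (d : Char) :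
    (l1 ++ l2).getD (l1.length + k) d = l2.getD k d := by
  rw [List.getD_append_right _ _ _ _ (by omega)]; simp

theorem getD_eq_getElem' (l : List Char) (n : Nat) (d : Char) (h : n < l.length) :
    l.getD n d = l[n] := by
  simp [List.getD_eq_getElem?_getD, List.getElem?_eq_getElem h]

theorem getD_mem (l : List Char) (n : Nat) (d : Char) (h : n < l.length) : l.getD n d ∈ l := by
  rw [getD_eq_getElem' l n d h]; exact List.getElem_mem h

theorem stFrom_brFree (l : List Char) : ∀ (st : Bool), brFree l → stFrom st l = st := by
  induction l with
  | nil => intro st _; rfl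
  | cons c cs ih =>
    intro st h
    have hc := h c (by simp)
    have hs : stA st c = st := by simp [stA, hc.1, hc.2]
    have : stFrom st (c :: cs) = stFrom (stA st c) cs := rfl
    rw [this, hs]
    exact ih st (fun x hx => h x (by simp [hx]))

theorem brFree_take (l : List Char) (i : Nat) (h : brFree l) : brFree (l.take i) :=
  fun c hc => h c (List.mem_of_mem_take hc)

theorem stateAt_succ (s : List Char) (m : Nat) (h : m < s.length) :
    stateAt s (m+1) = stA (stateAt s m) (s.getD m ' ') := by
  unfold stateAt stFrom
  rw [List.take_succ, List.getElem?_eq_getElem h, getD_eq_getElem' s m ' ' h,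
      List.foldl_append]
  simp [List.foldl]

theorem slice_triple (s : List Char) (i : Nat) (h : i + 2 < s.length) :
    PySem.List.slice s (some (i:Int)) (some ((i:Int)+3)) =
      [s.getD i ' ', s.getD (i+1) ' ', s.getD (i+2) ' '] := by
  have h3 : ((i:Int)+3) = ((i+3 : Nat) : Int) := by push_cast; ring
  rw [h3, PySem.List.slice_natCast]
  have e : i + 3 - i = 3 := by omega
  rw [e, List.drop_eq_getElem_cons (by omega : i < s.length),
      List.drop_eq_getElem_cons (by omega : i+1 < s.length),
      List.drop_eq_getElem_cons (by omega : i+2 < s.length)]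
  rw [getD_eq_getElem' s i ' ' (by omega), getD_eq_getElem' s (i+1) ' ' (by omega),
     getD_eq_getElem' s (i+2) ' ' (by omega)]
  simp only [List.take_succ_cons, List.take_zero]
-- triples inside a single segment (no bracket conditions needed there)
def TriSegP (seg : List Char) (x : Char × Char) : Prop :=
  ∃ k, k + 2 < seg.length ∧ seg.getD k ' ' = x.1 ∧ seg.getD (k+1) ' ' = x.2 ∧
    seg.getD (k+2) ' ' = x.1 ∧ x.1 ≠ x.2

theorem triAt_append_left {l1 l2 : List Char} {i : Nat} {a b : Char} (h : i + 2 < l1.length) :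
    TriAt (l1 ++ l2) i a b ↔ TriAt l1 i a b := by
  unfold TriAt
  rw [getD_app_left l1 l2 i ' ' (by omega), getD_app_left l1 l2 (i+1) ' ' (by omega),
      getD_app_left l1 l2 (i+2) ' ' (by omega)]
  simp [List.length_append]
  intros; omega

theorem triAt_append_right {l1 l2 : List Char} {k : Nat} {a b : Char} :
    TriAt (l1 ++ l2) (l1.length + k) a b ↔ TriAt l2 k a b := by
  unfold TriAt
  have e1 : l1.length + k + 1 = l1.length + (k+1) := by omega
  have e2 : l1.length + k + 2 = l1.length + (k+2) := by omega
  rw [e1, e2, getD_app_right, getD_app_right, getD_app_right]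
  simp [List.length_append]

-- the recursive form of B's phase-1 partition
def segsR (inside : Bool) (cur : List Char) : List Char → List (Bool × List Char)
  | [] => [(inside, cur)]
  | c :: cs => if c = '[' ∨ c = ']' then (inside, cur) :: segsR (c = '[') [] cs
               else segsR inside (cur ++ [c]) cs

theorem foldl_bSegStep (l : List Char) : ∀ (acc : List (Bool × List Char)) (cur : List Char) (inside : Bool),
    (l.foldl bSegStep (acc, cur, inside)).1 ++
      [((l.foldl bSegStep (acc, cur, inside)).2.2, (l.foldl bSegStep (acc, cur, inside)).2.1)] =
      acc ++ segsR inside cur l := by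
  induction l with
  | nil => intro acc cur inside; simp [segsR]
  | cons c cs ih =>
    intro acc cur inside
    by_cases h : c = '[' ∨ c = ']'
    · simp only [List.foldl_cons, bSegStep, if_pos h, segsR]
      rw [ih]
      simp
    · have hseg : segsR inside cur (c :: cs) = segsR inside (cur ++ [c]) cs := by
        rw [segsR, if_neg h]
      simp only [List.foldl_cons, bSegStep, if_neg h, hseg]
      exact ih _ _ _

theorem triSeg_iff (cur : List Char) (hbf : brFree cur) (inside t : Bool) (a b : Char) :
    (inside = t ∧ TriSegP cur (a, b)) ↔
      ((b ≠ '[' ∧ b ≠ ']') ∧ ∃ i, TriAt cur i a b ∧ stFrom inside (cur.take i) = t) := by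
  constructor
  · rintro ⟨ht, k, hk, h0, h1, h2, hab⟩
    have ha := hbf _ (getD_mem cur k ' ' (by omega))
    have hb := hbf _ (getD_mem cur (k+1) ' ' (by omega))
    rw [h0] at ha; rw [h1] at hb
    exact ⟨hb, k, ⟨hk, h0, h1, h2, hab, ha.1, ha.2⟩,
      by rw [stFrom_brFree _ _ (brFree_take cur k hbf)]; exact ht⟩
  · rintro ⟨hb, i, ⟨hk, h0, h1, h2, hab, _, _⟩, hst⟩
    rw [stFrom_brFree _ _ (brFree_take cur i hbf)] at hst
    exact ⟨hst, i, hk, h0, h1, h2, hab⟩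

theorem triAt_bracket_split (cur : List Char) (c : Char) (cs : List Char)
    (hc : c = '[' ∨ c = ']') (a b : Char) (hb : b ≠ '[' ∧ b ≠ ']') (P : Nat → Prop) :
    (∃ i, TriAt (cur ++ c :: cs) i a b ∧ P i) ↔
      ((∃ i, i + 2 < cur.length ∧ TriAt cur i a b ∧ P i) ∨
       (∃ k, TriAt cs k a b ∧ P (cur.length + 1 + k))) := by
  constructor
  · rintro ⟨i, hT, hP⟩
    have hlen := hT.1
    by_cases hin : i + 2 < cur.length
    · exact Or.inl ⟨i, hin, (triAt_append_left hin).mp hT, hP⟩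
    · have hup : cur.length + 1 ≤ i := by
        rcases hT with ⟨hl, h0, h1, h2, hab, ha1, ha2⟩
        by_contra hno
        -- i = cur.length, i+1 = cur.length, or i+2 = cur.length; each forces a bracket character
        have hcget : (cur ++ c :: cs).getD cur.length ' ' = c := by
          have := getD_app_right cur (c :: cs) 0 ' '
          simpa using this
        rcases (by omega : i = cur.length ∨ i + 1 = cur.length ∨ i + 2 = cur.length) with h | h | h
        · rw [h, hcget] at h0
          rcases hc with rfl | rfl
          · exact ha1 h0.symm
          · exact ha2 h0.symm
        · rw [h, hcget] at h1
          rcases hc with rfl | rfl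
          · exact hb.1 h1.symm
          · exact hb.2 h1.symm
        · rw [h, hcget] at h2
          rcases hc with rfl | rfl
          · exact ha1 h2.symm
          · exact ha2 h2.symm
      refine Or.inr ⟨i - (cur.length + 1), ?_, ?_⟩
      · have e : i = (cur ++ [c]).length + (i - (cur.length + 1)) := by
          simp only [List.length_append, List.length_cons, List.length_nil]
          omega
        rw [e] at hT
        have := (triAt_append_right (l1 := cur ++ [c]) (l2 := cs)).mp (by simpa using hT)
        exact this
      · have : cur.length + 1 + (i - (cur.length + 1)) = i := by omega
        rw [this]; exact hP
  · rintro (⟨i, hin, hT, hP⟩ | ⟨k, hT, hP⟩)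
    · exact ⟨i, (triAt_append_left (l2 := c :: cs) hin).mpr hT, hP⟩
    · refine ⟨cur.length + 1 + k, ?_, hP⟩
      have e : cur.length + 1 + k = (cur ++ [c]).length + k := by
        simp only [List.length_append, List.length_cons, List.length_nil]
      rw [e, show cur ++ c :: cs = (cur ++ [c]) ++ cs by simp]
      exact triAt_append_right.mpr hT

theorem stFrom_take_shift (cur : List Char) (c : Char) (cs : List Char) (inside : Bool)
    (hbf : brFree cur) (hc : c = '[' ∨ c = ']') (k : Nat) :
    stFrom inside ((cur ++ c :: cs).take (cur.length + 1 + k)) =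
      stFrom (decide (c = '[')) (cs.take k) := by
  have e : cur.length + 1 + k = cur.length + (1 + k) := by omega
  rw [e, stFrom, List.take_append, List.foldl_append,
      List.take_of_length_le (by omega : cur.length ≤ cur.length + (1+k)),
      show cur.length + (1 + k) - cur.length = 1 + k by omega,
      show (1 : Nat) + k = k + 1 by omega]
  have h1 : (c :: cs).take (k + 1) = c :: cs.take k := rfl
  rw [h1]
  have h2 : List.foldl stA inside cur = inside := stFrom_brFree cur inside hbf
  rw [h2]
  have h3 : stA inside c = decide (c = '[') := by
    rcases hc with rfl | rfl <;> simp [stA]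
  simp [List.foldl, h3, stFrom]

theorem segsR_core (a b : Char) (t : Bool) :
    ∀ (l cur : List Char) (inside : Bool), brFree cur →
    ((∃ sg ∈ segsR inside cur l, sg.1 = t ∧ TriSegP sg.2 (a, b)) ↔
      ((b ≠ '[' ∧ b ≠ ']') ∧
        ∃ i, TriAt (cur ++ l) i a b ∧ stFrom inside ((cur ++ l).take i) = t)) := by
  intro l
  induction l with
  | nil =>
    intro cur inside hbf
    simp only [segsR, List.mem_singleton, List.append_nil]
    rw [← triSeg_iff cur hbf inside t a b]
    constructor
    · rintro ⟨sg, rfl, h⟩; exact ⟨h.1, h.2⟩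
    · rintro ⟨h1, h2⟩; exact ⟨(inside, cur), rfl, h1, h2⟩
  | cons c cs ih =>
    intro cur inside hbf
    by_cases hc : c = '[' ∨ c = ']'
    · rw [segsR, if_pos hc]
      constructor
      · rintro ⟨sg, hsg, hmem⟩
        rcases List.mem_cons.mp hsg with rfl | hsg'
        · -- the flushed (inside, cur) segment
          have := (triSeg_iff cur hbf inside t a b).mp ⟨hmem.1, hmem.2⟩
          rcases this with ⟨hb, i, hT, hst⟩
          refine ⟨hb, ?_⟩
          rw [triAt_bracket_split cur c cs hc a b hb
              (fun i => stFrom inside ((cur ++ c :: cs).take i) = t)]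
          refine Or.inl ⟨i, hT.1, hT, ?_⟩
          rw [List.take_append_of_le_length (by have := hT.1; omega : i ≤ cur.length)]
          exact hst
        · have := (ih [] (decide (c = '[')) (by intro x hx; cases hx)).mp ⟨sg, hsg', hmem⟩
          rcases this with ⟨hb, k, hT, hst⟩
          refine ⟨hb, ?_⟩
          rw [triAt_bracket_split cur c cs hc a b hb
              (fun i => stFrom inside ((cur ++ c :: cs).take i) = t)]
          refine Or.inr ⟨k, by simpa using hT, ?_⟩
          rw [stFrom_take_shift cur c cs inside hbf hc k]
          simpa using hst
      · rintro ⟨hb, hex⟩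
        rw [triAt_bracket_split cur c cs hc a b hb
            (fun i => stFrom inside ((cur ++ c :: cs).take i) = t)] at hex
        rcases hex with ⟨i, hin, hT, hP⟩ | ⟨k, hT, hP⟩
        · rw [List.take_append_of_le_length (by omega : i ≤ cur.length)] at hP
          have := (triSeg_iff cur hbf inside t a b).mpr ⟨hb, i, hT, hP⟩
          exact ⟨(inside, cur), by simp, this.1, this.2⟩
        · rw [stFrom_take_shift cur c cs inside hbf hc k] at hP
          have := (ih [] (decide (c = '[')) (by intro x hx; cases hx)).mpr
            ⟨hb, k, by simpa using hT, by simpa using hP⟩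
          rcases this with ⟨sg, hsg, hm⟩
          exact ⟨sg, List.mem_cons_of_mem _ hsg, hm⟩
    · rw [segsR, if_neg hc]
      have hbf' : brFree (cur ++ [c]) := by
        intro x hx
        rcases List.mem_append.mp hx with h | h
        · exact hbf x h
        · simp at h; subst h
          push_neg at hc
          exact hc
      have := ih (cur ++ [c]) inside hbf'
      rw [this]
      simp
def TriSegAt (seg : List Char) (k : Nat) (x : Char × Char) : Prop :=
  k + 2 < seg.length ∧ seg.getD k ' ' = x.1 ∧ seg.getD (k+1) ' ' = x.2 ∧
    seg.getD (k+2) ' ' = x.1 ∧ x.1 ≠ x.2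

-- B's inner loop in Nat-indexed form
def bStep (t : Bool) (seg : List Char) (q : PySem.Set (Char × Char) × PySem.Set (Char × Char))
    (k : Nat) : PySem.Set (Char × Char) × PySem.Set (Char × Char) :=
  if seg.getD k ' ' = seg.getD (k+2) ' ' ∧ seg.getD k ' ' ≠ seg.getD (k+1) ' ' then
    if t then (q.1, PySem.Set.add q.2 (seg.getD k ' ', seg.getD (k+1) ' '))
    else (PySem.Set.add q.1 (seg.getD k ' ', seg.getD (k+1) ' '), q.2)
  else q

theorem bAddTriples_eq (sg : Bool × List Char)
    (p : PySem.Set (Char × Char) × PySem.Set (Char × Char)) :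
    bAddTriples p sg = (List.range (sg.2.length - 2)).foldl (bStep sg.1 sg.2) p := by
  unfold bAddTriples
  rw [PySem.List.pyRange_one, List.foldl_map]
  have hn : ((sg.2.length : Int) - 2 - 0).toNat = sg.2.length - 2 := by omega
  rw [hn]
  congr 1
  funext q k
  have c0 : ((0 : Int) + (k : Int)) = ((k : Nat) : Int) := by push_cast; ring
  have c1 : ((k : Int) + 1) = (((k+1) : Nat) : Int) := by push_cast; ring
  have c2 : ((k : Int) + 2) = (((k+2) : Nat) : Int) := by push_cast; ring
  simp only [bStep, c0, c1, c2, PySem.List.pyGetD_natCast, List.getD]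

theorem mem_bStep_fold (t : Bool) (seg : List Char) (x : Char × Char)
    (p : PySem.Set (Char × Char) × PySem.Set (Char × Char)) :
    ∀ (n : Nat), n ≤ seg.length - 2 →
    ((x ∈ ((List.range n).foldl (bStep t seg) p).1 ↔
        x ∈ p.1 ∨ (t = false ∧ ∃ k, k < n ∧ TriSegAt seg k x)) ∧
     (x ∈ ((List.range n).foldl (bStep t seg) p).2 ↔
        x ∈ p.2 ∨ (t = true ∧ ∃ k, k < n ∧ TriSegAt seg k x))) := by
  intro n
  induction n with
  | zero => intro _; simp
  | succ n ih =>
    intro hn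
    obtain ⟨ih1, ih2⟩ := ih (by omega)
    have hb : n + 2 < seg.length := by omega
    rw [List.range_succ, List.foldl_append, List.foldl_cons, List.foldl_nil]
    have hnew : ∀ y : Char × Char,
        (y = (seg.getD n ' ', seg.getD (n+1) ' ') ∧
          seg.getD n ' ' = seg.getD (n+2) ' ' ∧ seg.getD n ' ' ≠ seg.getD (n+1) ' ')
        ↔ TriSegAt seg n y := by
      intro y
      constructor
      · rintro ⟨rfl, h1, h2⟩; exact ⟨hb, rfl, rfl, h1.symm, h2⟩
      · rintro ⟨_, e1, e2, e3, hne⟩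
        exact ⟨by rw [e1, e2], e1.trans e3.symm, by rw [e1, e2]; exact hne⟩
    by_cases hcond : seg.getD n ' ' = seg.getD (n+2) ' ' ∧ seg.getD n ' ' ≠ seg.getD (n+1) ' '
    · cases t
      · have hred : bStep false seg ((List.range n).foldl (bStep false seg) p) n =
            (PySem.Set.add ((List.range n).foldl (bStep false seg) p).1
              (seg.getD n ' ', seg.getD (n+1) ' '),
             ((List.range n).foldl (bStep false seg) p).2) := by
          unfold bStep
          rw [if_pos hcond, if_neg (by decide : ¬(false = true))]
        rw [hred]
        constructor
        · show x ∈ PySem.Set.add _ _ ↔ _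
          rw [PySem.Set.mem_add, ih1]
          constructor
          · rintro ((h | ⟨_, k, hk, hT⟩) | h)
            · exact Or.inl h
            · exact Or.inr ⟨rfl, k, by omega, hT⟩
            · exact Or.inr ⟨rfl, n, by omega, (hnew x).mp ⟨h, hcond⟩⟩
          · rintro (h | ⟨_, k, hk, hT⟩)
            · exact Or.inl (Or.inl h)
            · rcases (by omega : k < n ∨ k = n) with hk' | rfl
              · exact Or.inl (Or.inr ⟨rfl, k, hk', hT⟩)
              · exact Or.inr ((hnew x).mpr hT).1
        · show x ∈ ((List.range n).foldl (bStep false seg) p).2 ↔ _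
          rw [ih2]; simp
      · have hred : bStep true seg ((List.range n).foldl (bStep true seg) p) n =
            (((List.range n).foldl (bStep true seg) p).1,
             PySem.Set.add ((List.range n).foldl (bStep true seg) p).2
              (seg.getD n ' ', seg.getD (n+1) ' ')) := by
          unfold bStep
          rw [if_pos hcond, if_pos (rfl : true = true)]
        rw [hred]
        constructor
        · show x ∈ ((List.range n).foldl (bStep true seg) p).1 ↔ _
          rw [ih1]; simp
        · show x ∈ PySem.Set.add _ _ ↔ _
          rw [PySem.Set.mem_add, ih2]
          constructor
          · rintro ((h | ⟨_, k, hk, hT⟩) | h)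
            · exact Or.inl h
            · exact Or.inr ⟨rfl, k, by omega, hT⟩
            · exact Or.inr ⟨rfl, n, by omega, (hnew x).mp ⟨h, hcond⟩⟩
          · rintro (h | ⟨_, k, hk, hT⟩)
            · exact Or.inl (Or.inl h)
            · rcases (by omega : k < n ∨ k = n) with hk' | rfl
              · exact Or.inl (Or.inr ⟨rfl, k, hk', hT⟩)
              · exact Or.inr ((hnew x).mpr hT).1
    · have hred : bStep t seg ((List.range n).foldl (bStep t seg) p) n =
          (List.range n).foldl (bStep t seg) p := by
        unfold bStep
        rw [if_neg hcond]
      have hkiff : (∃ k, k < n + 1 ∧ TriSegAt seg k x) ↔ (∃ k, k < n ∧ TriSegAt seg k x) := by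
        constructor
        · rintro ⟨k, hk, hT⟩
          rcases (by omega : k < n ∨ k = n) with hk' | rfl
          · exact ⟨k, hk', hT⟩
          · exact absurd ⟨hT.2.1.trans hT.2.2.2.1.symm,
              by rw [hT.2.1, hT.2.2.1]; exact hT.2.2.2.2⟩ hcond
        · rintro ⟨k, hk, hT⟩; exact ⟨k, by omega, hT⟩
      rw [hred]
      constructor
      · rw [ih1]; simp only [hkiff]
      · rw [ih2]; simp only [hkiff]
theorem mem_outer (x : Char × Char) :
    ∀ (segments : List (Bool × List Char))
      (p : PySem.Set (Char × Char) × PySem.Set (Char × Char)),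
    ((x ∈ (segments.foldl bAddTriples p).1 ↔
        x ∈ p.1 ∨ ∃ sg ∈ segments, sg.1 = false ∧ TriSegP sg.2 x) ∧
     (x ∈ (segments.foldl bAddTriples p).2 ↔
        x ∈ p.2 ∨ ∃ sg ∈ segments, sg.1 = true ∧ TriSegP sg.2 x)) := by
  intro segments
  induction segments with
  | nil => intro p; simp
  | cons sg rest ih =>
    intro p
    rw [List.foldl_cons]
    obtain ⟨ih1, ih2⟩ := ih (bAddTriples p sg)
    have hM := mem_bStep_fold sg.1 sg.2 x p (sg.2.length - 2) (le_refl _)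
    have hseg : ∀ (u : Prop),
        (u ∧ ∃ k, k < sg.2.length - 2 ∧ TriSegAt sg.2 k x) ↔ (u ∧ TriSegP sg.2 x) := by
      intro u
      constructor
      · rintro ⟨hu, k, _, hT⟩; exact ⟨hu, k, hT⟩
      · rintro ⟨hu, k, hT⟩; exact ⟨hu, k, by have := hT.1; omega, hT⟩
    constructor
    · rw [ih1, bAddTriples_eq sg p, hM.1]
      constructor
      · rintro ((h | h) | h)
        · exact Or.inl h
        · exact Or.inr ⟨sg, by simp, h.1, ((hseg (sg.1 = false)).mp h).2⟩
        · rcases h with ⟨sg', hsg', hm⟩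
          exact Or.inr ⟨sg', by simp [hsg'], hm⟩
      · rintro (h | ⟨sg', hsg', hm⟩)
        · exact Or.inl (Or.inl h)
        · rcases List.mem_cons.mp hsg' with rfl | hsg''
          · exact Or.inl (Or.inr ((hseg (sg'.1 = false)).mpr ⟨hm.1, hm.2⟩))
          · exact Or.inr ⟨sg', hsg'', hm⟩
    · rw [ih2, bAddTriples_eq sg p, hM.2]
      constructor
      · rintro ((h | h) | h)
        · exact Or.inl h
        · exact Or.inr ⟨sg, by simp, h.1, ((hseg (sg.1 = true)).mp h).2⟩
        · rcases h with ⟨sg', hsg', hm⟩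
          exact Or.inr ⟨sg', by simp [hsg'], hm⟩
      · rintro (h | ⟨sg', hsg', hm⟩)
        · exact Or.inl (Or.inl h)
        · rcases List.mem_cons.mp hsg' with rfl | hsg''
          · exact Or.inl (Or.inr ((hseg (sg'.1 = true)).mpr ⟨hm.1, hm.2⟩))
          · exact Or.inr ⟨sg', hsg'', hm⟩

theorem B_iff (checking : String) : supports_ssl_alt checking = true ↔ SpecT checking.toList := by
  unfold supports_ssl_alt
  rw [List.any_eq_true]
  have hseg := foldl_bSegStep checking.toList [] [] false
  rw [List.nil_append] at hseg
  rw [hseg]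
  constructor
  · rintro ⟨ab, hmem, hcont⟩
    have h2 := ((mem_outer ab (segsR false [] checking.toList)
        (PySem.Set.empty, PySem.Set.empty)).2.mp hmem)
    rcases h2 with h2 | h2
    · cases h2
    have h1 := ((mem_outer (ab.2, ab.1) (segsR false [] checking.toList)
        (PySem.Set.empty, PySem.Set.empty)).1.mp ((PySem.Set.contains_iff _ _).mp hcont))
    rcases h1 with h1 | h1
    · cases h1
    have hc2 := (segsR_core ab.1 ab.2 true checking.toList [] false (by intro c hc; cases hc)).mp
      (by simpa using h2)
    have hc1 := (segsR_core ab.2 ab.1 false checking.toList [] false (by intro c hc; cases hc)).mp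
      (by simpa using h1)
    rcases hc2 with ⟨_, j, hTj, hsj⟩
    rcases hc1 with ⟨_, i, hTi, hsi⟩
    exact ⟨ab.2, ab.1, i, j, by simpa using hTi, by simpa using hsi,
      by simpa using hTj, by simpa using hsj⟩
  · rintro ⟨a, b, i, j, hTi, hsi, hTj, hsj⟩
    have hbnb : b ≠ '[' ∧ b ≠ ']' := ⟨hTj.2.2.2.2.2.1, hTj.2.2.2.2.2.2⟩
    have hanb : a ≠ '[' ∧ a ≠ ']' := ⟨hTi.2.2.2.2.2.1, hTi.2.2.2.2.2.2⟩
    have h2 := (segsR_core b a true checking.toList [] false (by intro c hc; cases hc)).mpr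
      ⟨hanb, j, by simpa using hTj, by simpa using hsj⟩
    have h1 := (segsR_core a b false checking.toList [] false (by intro c hc; cases hc)).mpr
      ⟨hbnb, i, by simpa using hTi, by simpa using hsi⟩
    refine ⟨(b, a), ?_, ?_⟩
    · exact ((mem_outer (b, a) (segsR false [] checking.toList)
        (PySem.Set.empty, PySem.Set.empty)).2.mpr (Or.inr h2))
    · exact (PySem.Set.contains_iff _ _).mpr
        ((mem_outer (a, b) (segsR false [] checking.toList)
          (PySem.Set.empty, PySem.Set.empty)).1.mpr (Or.inr h1))
-- A-side: triples recorded by the loop up to position m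
def recB (s : List Char) (t : Bool) (i : Nat) : Bool :=
  decide (s.getD i ' ' ≠ '[' ∧ s.getD i ' ' ≠ ']' ∧ s.getD i ' ' = s.getD (i+2) ' ' ∧
          s.getD i ' ' ≠ s.getD (i+1) ' ' ∧ stateAt s i = t)

def recList (s : List Char) (t : Bool) (m : Nat) : List (List Char) :=
  ((List.range m).filter (recB s t)).map
    (fun (i : Nat) => PySem.List.slice s (some (i:Int)) (some ((i:Int)+3)))

theorem mem_recList (s : List Char) (t : Bool) (m : Nat) (x : List Char) :
    x ∈ recList s t m ↔
      ∃ i, (i < m ∧ recB s t i = true) ∧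
        PySem.List.slice s (some (i:Int)) (some ((i:Int)+3)) = x := by
  simp [recList, List.mem_map, List.mem_filter, List.mem_range]

theorem recList_succ (s : List Char) (t : Bool) (m : Nat) :
    recList s t (m+1) = recList s t m ++
      (if recB s t m then [PySem.List.slice s (some (m:Int)) (some ((m:Int)+3))] else []) := by
  unfold recList
  rw [List.range_succ, List.filter_append, List.map_append]
  by_cases h : recB s t m <;> simp [h]

theorem not_triAt_bracket (s : List Char) (m : Nat) (a b : Char)
    (h : s.getD m ' ' = '[' ∨ s.getD m ' ' = ']') : ¬ TriAt s m a b := by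
  rintro ⟨_, e0, _, _, _, ha1, ha2⟩
  rcases h with h | h
  · exact ha1 (e0.symm.trans h)
  · exact ha2 (e0.symm.trans h)

theorem not_triAt_nocond (s : List Char) (m : Nat) (a b : Char)
    (h : ¬(s.getD m ' ' = s.getD (m+2) ' ' ∧ s.getD m ' ' ≠ s.getD (m+1) ' ')) :
    ¬ TriAt s m a b := by
  rintro ⟨_, e0, e1, e2, hne, _, _⟩
  exact h ⟨e0.trans e2.symm, by rw [e0, e1]; exact hne⟩

theorem aLoop_main (s : List Char) :
    ∀ (d m : Nat), (s.length : Int) - 2 ≤ (m : Int) + (d : Int) →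
    ((aLoop s (stateAt s m) (recList s false m) (recList s true m)
        (PySem.List.pyRange (m : Int) ((s.length : Int) - 2) 1)) = true ↔
      ∃ a b i j, TriAt s i a b ∧ stateAt s i = false ∧ TriAt s j b a ∧ stateAt s j = true ∧
        (m ≤ i ∨ m ≤ j)) := by
  intro d
  induction d with
  | zero =>
    intro m h
    rw [PySem.List.pyRange_one_eq_nil (by omega)]
    simp only [aLoop, Bool.false_eq_true, false_iff]
    rintro ⟨a, b, i, j, hi, _, hj, _, hm⟩
    have h1 := hi.1
    have h2 := hj.1
    omega
  | succ d ih =>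
    intro m h
    by_cases hK : (s.length : Int) - 2 ≤ (m : Int)
    · rw [PySem.List.pyRange_one_eq_nil hK]
      simp only [aLoop, Bool.false_eq_true, false_iff]
      rintro ⟨a, b, i, j, hi, _, hj, _, hm⟩
      have h1 := hi.1
      have h2 := hj.1
      omega
    · have hmlen : m + 2 < s.length := by omega
      rw [PySem.List.pyRange_one_cons (by omega)]
      have c0 : PySem.List.pyGetD s (m:Int) ' ' = s.getD m ' ' := by
        simp only [PySem.List.pyGetD_natCast]
      have c1 : PySem.List.pyGetD s ((m:Int)+1) ' ' = s.getD (m+1) ' ' := by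
        rw [show ((m:Int)+1) = (((m+1):Nat):Int) by push_cast; ring]
        simp only [PySem.List.pyGetD_natCast]
      have c2 : PySem.List.pyGetD s ((m:Int)+2) ' ' = s.getD (m+2) ' ' := by
        rw [show ((m:Int)+2) = (((m+2):Nat):Int) by push_cast; ring]
        simp only [PySem.List.pyGetD_natCast]
      have cr : ((m:Int)+1) = (((m+1):Nat):Int) := by push_cast; ring
      simp only [aLoop, c0, c1, c2]
      simp only [cr]
      have hIH := ih (m+1) (by push_cast; omega)
      by_cases hbr1 : s.getD m ' ' = '['
      · rw [if_pos hbr1]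
        have hst1 : stateAt s (m+1) = true := by
          rw [stateAt_succ s m (by omega), hbr1]; simp [stA]
        have hr : ∀ t, recList s t (m+1) = recList s t m := by
          intro t
          rw [recList_succ]
          have : recB s t m = false := by
            simp only [recB, decide_eq_false_iff_not]
            rintro ⟨h1, _, _, _, _⟩
            exact h1 hbr1
          simp [this]
        rw [hst1, hr false, hr true] at hIH
        rw [hIH]
        constructor
        · rintro ⟨a, b, i, j, hi, hsi, hj, hsj, hm'⟩
          exact ⟨a, b, i, j, hi, hsi, hj, hsj, by omega⟩
        · rintro ⟨a, b, i, j, hi, hsi, hj, hsj, hm'⟩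
          refine ⟨a, b, i, j, hi, hsi, hj, hsj, ?_⟩
          have hni : i ≠ m := fun he => not_triAt_bracket s m a b (Or.inl hbr1) (he ▸ hi)
          have hnj : j ≠ m := fun he => not_triAt_bracket s m b a (Or.inl hbr1) (he ▸ hj)
          omega
      · by_cases hbr2 : s.getD m ' ' = ']'
        · rw [if_neg hbr1, if_pos hbr2]
          have hst1 : stateAt s (m+1) = false := by
            rw [stateAt_succ s m (by omega), hbr2]; simp [stA]
          have hr : ∀ t, recList s t (m+1) = recList s t m := by
            intro t
            rw [recList_succ]
            have : recB s t m = false := by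
              simp only [recB, decide_eq_false_iff_not]
              rintro ⟨_, h2, _, _, _⟩
              exact h2 hbr2
            simp [this]
          rw [hst1, hr false, hr true] at hIH
          rw [hIH]
          constructor
          · rintro ⟨a, b, i, j, hi, hsi, hj, hsj, hm'⟩
            exact ⟨a, b, i, j, hi, hsi, hj, hsj, by omega⟩
          · rintro ⟨a, b, i, j, hi, hsi, hj, hsj, hm'⟩
            refine ⟨a, b, i, j, hi, hsi, hj, hsj, ?_⟩
            have hni : i ≠ m := fun he => not_triAt_bracket s m a b (Or.inr hbr2) (he ▸ hi)
            have hnj : j ≠ m := fun he => not_triAt_bracket s m b a (Or.inr hbr2) (he ▸ hj)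
            omega
        · rw [if_neg hbr1, if_neg hbr2]
          have hst1 : stateAt s (m+1) = stateAt s m := by
            rw [stateAt_succ s m (by omega)]
            unfold stA
            rw [if_neg hbr1, if_neg hbr2]
          by_cases hcond : s.getD m ' ' = s.getD (m+2) ' ' ∧ s.getD m ' ' ≠ s.getD (m+1) ' '
          · rw [if_pos hcond]
            -- a genuine ABA triple at position m
            have hTm : ∀ (t : Bool), stateAt s m = t →
                TriAt s m (s.getD m ' ') (s.getD (m+1) ' ') ∧ recB s t m = true := by
              intro t ht
              refine ⟨⟨hmlen, rfl, rfl, hcond.1.symm, hcond.2, hbr1, hbr2⟩, ?_⟩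
              simp only [recB, decide_eq_true_eq]
              exact ⟨hbr1, hbr2, hcond.1, hcond.2, ht⟩
            have hslice := slice_triple s m (by omega)
            cases hst : stateAt s m
            · -- outside brackets: record an ABA, look for the BAB
              rw [if_neg (by simp : ¬(false = true))]
              have hrT : recList s true (m+1) = recList s true m := by
                rw [recList_succ]
                have : recB s true m = false := by
                  simp only [recB, decide_eq_false_iff_not]
                  rintro ⟨_, _, _, _, h5⟩
                  rw [hst] at h5
                  exact absurd h5 (by decide)
                simp [this]
              have hrF : recList s false (m+1) =
                  recList s false m ++ [PySem.List.slice s (some (m:Int)) (some ((m:Int)+3))] := by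
                rw [recList_succ, if_pos ((hTm false hst).2)]
              by_cases hmem : (recList s true m).contains
                  [s.getD (m+1) ' ', s.getD m ' ', s.getD (m+1) ' '] = true
              · rw [if_pos hmem]
                simp only [true_iff]
                have hx := (List.contains_iff_mem).mp hmem
                rcases (mem_recList s true m _).mp hx with ⟨i, ⟨him, hrec⟩, heq⟩
                have hi2 : i + 2 < s.length := by omega
                rw [slice_triple s i hi2] at heq
                simp only [List.cons.injEq, and_true] at heq
                simp only [recB, decide_eq_true_eq] at hrec
                refine ⟨s.getD m ' ', s.getD (m+1) ' ', m, i,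
                  (hTm false hst).1, hst, ?_, hrec.2.2.2.2, Or.inl (le_refl m)⟩
                exact ⟨hi2, heq.1, heq.2.1, hrec.2.2.1.symm.trans heq.1,
                  fun hba => hcond.2 hba.symm, heq.1 ▸ hrec.1, heq.1 ▸ hrec.2.1⟩
              · rw [if_neg hmem]
                rw [hst1, hst] at hIH
                rw [hrT, hrF] at hIH
                rw [hIH]
                constructor
                · rintro ⟨a, b, i, j, hi, hsi, hj, hsj, hm'⟩
                  exact ⟨a, b, i, j, hi, hsi, hj, hsj, by omega⟩
                · rintro ⟨a, b, i, j, hi, hsi, hj, hsj, hm'⟩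
                  refine ⟨a, b, i, j, hi, hsi, hj, hsj, ?_⟩
                  have hnj : j ≠ m := by
                    intro he
                    rw [he, hst] at hsj
                    exact absurd hsj (by decide)
                  have hni : i = m → j < m → False := by
                    intro he hjm
                    -- partner bab at j < m would have been found: contradiction with hmem
                    have hi' : TriAt s m a b := he ▸ hi
                    apply hmem
                    apply List.contains_iff_mem.mpr
                    apply (mem_recList s true m _).mpr
                    refine ⟨j, ⟨hjm, ?_⟩, ?_⟩
                    · simp only [recB, decide_eq_true_eq]
                      refine ⟨?_, ?_, ?_, ?_, hsj⟩
                      · rw [hj.2.1]; exact hj.2.2.2.2.2.1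
                      · rw [hj.2.1]; exact hj.2.2.2.2.2.2
                      · rw [hj.2.1, hj.2.2.2.1]
                      · rw [hj.2.1, hj.2.2.1]
                        exact fun hh => hj.2.2.2.2.1 hh
                    · rw [slice_triple s j (by have := hj.1; omega)]
                      rw [hj.2.1, hj.2.2.1, hj.2.2.2.1, hi'.2.1, hi'.2.2.1]
                  rcases hm' with h' | h'
                  · by_cases hj2 : m + 1 ≤ j
                    · exact Or.inr hj2
                    · left
                      by_contra hi2
                      exact hni (by omega) (by omega)
                  · exact Or.inr (by omega)
            · -- inside brackets: record a BAB, look for the ABA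
              rw [if_pos rfl]
              have hrF : recList s false (m+1) = recList s false m := by
                rw [recList_succ]
                have : recB s false m = false := by
                  simp only [recB, decide_eq_false_iff_not]
                  rintro ⟨_, _, _, _, h5⟩
                  rw [hst] at h5
                  exact absurd h5 (by decide)
                simp [this]
              have hrT : recList s true (m+1) =
                  recList s true m ++ [PySem.List.slice s (some (m:Int)) (some ((m:Int)+3))] := by
                rw [recList_succ, if_pos ((hTm true hst).2)]
              by_cases hmem : (recList s false m).contains
                  [s.getD (m+1) ' ', s.getD m ' ', s.getD (m+1) ' '] = true
              · rw [if_pos hmem]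
                simp only [true_iff]
                have hx := (List.contains_iff_mem).mp hmem
                rcases (mem_recList s false m _).mp hx with ⟨i, ⟨him, hrec⟩, heq⟩
                have hi2 : i + 2 < s.length := by omega
                rw [slice_triple s i hi2] at heq
                simp only [List.cons.injEq, and_true] at heq
                simp only [recB, decide_eq_true_eq] at hrec
                refine ⟨s.getD (m+1) ' ', s.getD m ' ', i, m,
                  ?_, hrec.2.2.2.2, (hTm true hst).1, hst, Or.inr (le_refl m)⟩
                exact ⟨hi2, heq.1, heq.2.1, hrec.2.2.1.symm.trans heq.1,
                  fun hba => hcond.2 hba.symm, heq.1 ▸ hrec.1, heq.1 ▸ hrec.2.1⟩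
              · rw [if_neg hmem]
                rw [hst1, hst] at hIH
                rw [hrF, hrT] at hIH
                rw [hIH]
                constructor
                · rintro ⟨a, b, i, j, hi, hsi, hj, hsj, hm'⟩
                  exact ⟨a, b, i, j, hi, hsi, hj, hsj, by omega⟩
                · rintro ⟨a, b, i, j, hi, hsi, hj, hsj, hm'⟩
                  refine ⟨a, b, i, j, hi, hsi, hj, hsj, ?_⟩
                  have hni : i ≠ m := by
                    intro he
                    rw [he, hst] at hsi
                    exact absurd hsi (by decide)
                  have hnj : j = m → i < m → False := by
                    intro he him
                    have hj' : TriAt s m b a := he ▸ hj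
                    apply hmem
                    apply List.contains_iff_mem.mpr
                    apply (mem_recList s false m _).mpr
                    refine ⟨i, ⟨him, ?_⟩, ?_⟩
                    · simp only [recB, decide_eq_true_eq]
                      refine ⟨?_, ?_, ?_, ?_, hsi⟩
                      · rw [hi.2.1]; exact hi.2.2.2.2.2.1
                      · rw [hi.2.1]; exact hi.2.2.2.2.2.2
                      · rw [hi.2.1, hi.2.2.2.1]
                      · rw [hi.2.1, hi.2.2.1]
                        exact fun hh => hi.2.2.2.2.1 hh
                    · rw [slice_triple s i (by have := hi.1; omega)]
                      rw [hi.2.1, hi.2.2.1, hi.2.2.2.1, hj'.2.1, hj'.2.2.1]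
                  rcases hm' with h' | h'
                  · exact Or.inl (by omega)
                  · by_cases hi2 : m + 1 ≤ i
                    · exact Or.inl hi2
                    · right
                      by_contra hj2
                      exact hnj (by omega) (by omega)
          · rw [if_neg hcond]
            have hr : ∀ t, recList s t (m+1) = recList s t m := by
              intro t
              rw [recList_succ]
              have : recB s t m = false := by
                simp only [recB, decide_eq_false_iff_not]
                rintro ⟨_, _, h1, h2, _⟩
                exact hcond ⟨h1, h2⟩
              simp [this]
            rw [hst1, hr false, hr true] at hIH
            rw [hIH]
            constructor
            · rintro ⟨a, b, i, j, hi, hsi, hj, hsj, hm'⟩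
              exact ⟨a, b, i, j, hi, hsi, hj, hsj, by omega⟩
            · rintro ⟨a, b, i, j, hi, hsi, hj, hsj, hm'⟩
              refine ⟨a, b, i, j, hi, hsi, hj, hsj, ?_⟩
              have hni : i ≠ m := fun he => not_triAt_nocond s m a b hcond (he ▸ hi)
              have hnj : j ≠ m := fun he => not_triAt_nocond s m b a hcond (he ▸ hj)
              omega

theorem A_iff (checking : String) : supports_ssl checking = true ↔ SpecT checking.toList := by
  unfold supports_ssl
  have h := aLoop_main checking.toList checking.toList.length 0 (by push_cast; omega)
  have e0 : ((0:Nat):Int) = 0 := by norm_num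
  have eS : stateAt checking.toList 0 = false := rfl
  have eF : recList checking.toList false 0 = [] := by simp [recList]
  have eT : recList checking.toList true 0 = [] := by simp [recList]
  rw [e0, eS, eF, eT] at h
  rw [h]
  constructor
  · rintro ⟨a, b, i, j, hi, hsi, hj, hsj, _⟩
    exact ⟨a, b, i, j, hi, hsi, hj, hsj⟩
  · rintro ⟨a, b, i, j, hi, hsi, hj, hsj⟩
    exact ⟨a, b, i, j, hi, hsi, hj, hsj, Or.inl (Nat.zero_le _)⟩

-- ===== VERDICT (by name: the statement is the Claim_ definition above) =====
theorem supports_ssl_spec : Claim_equal_supports_ssl := by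
  intro checking _
  unfold Spec_supports_ssl
  have h := (A_iff checking).trans (B_iff checking).symm
  cases hA : supports_ssl checking <;> cases hB : supports_ssl_alt checking <;> simp_all
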